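-- pv_equiv track=rewrite | github.com/fau-is/IntroCS | archive/graph_implementation_unweighted_old.py | edge_in_sp
-- ===== SOURCE A (Python) =====
-- def edge_in_sp(pair, sp):
--     if sp == None:
--         return False
--     elif len(sp) <2:
--         return False
--     pairs = [(sp[i],sp[i+1]) for i in range(len(sp)-1)]
--     if pair in pairs:
--         return True
--     elif (pair[1],pair[0]) in pairs:
--         return True
--     else:
--         return False
-- ===== SOURCE B (Python) =====
-- def edge_in_sp(pair, sp):
--     # Occurrence-indexed check: instead of scanning the list of consecutive
--     # pairs, find every position of the edge's first endpoint and test whether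
--     # the second endpoint sits next to it (on either side).
--     if sp is None:
--         return False
--     if len(sp) < 2:
--         return False
--     a, b = pair
--     hits = [i for i, v in enumerate(sp) if v == a]
--     n = len(sp)
--     for i in hits:
--         if (i + 1 < n and sp[i + 1] == b) or (i > 0 and sp[i - 1] == b):
--             return True
--     return False
-- ===== Notes on version B (the rewrite author's own statement) =====
-- stated objective: alternative
-- what changed: A materializes the list of consecutive path pairs and runs two membership scans for the edge and its reverse; B is occurrence-indexed: it collects the positions of the edge's first endpoint and checks whether the second endpoint is adjacent (on either side) to any of them, never building or searching a pair list of tuples (the measured constant-factor win comes from avoiding tuple allocation and tuple-equality scans).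
import Mathlib
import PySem

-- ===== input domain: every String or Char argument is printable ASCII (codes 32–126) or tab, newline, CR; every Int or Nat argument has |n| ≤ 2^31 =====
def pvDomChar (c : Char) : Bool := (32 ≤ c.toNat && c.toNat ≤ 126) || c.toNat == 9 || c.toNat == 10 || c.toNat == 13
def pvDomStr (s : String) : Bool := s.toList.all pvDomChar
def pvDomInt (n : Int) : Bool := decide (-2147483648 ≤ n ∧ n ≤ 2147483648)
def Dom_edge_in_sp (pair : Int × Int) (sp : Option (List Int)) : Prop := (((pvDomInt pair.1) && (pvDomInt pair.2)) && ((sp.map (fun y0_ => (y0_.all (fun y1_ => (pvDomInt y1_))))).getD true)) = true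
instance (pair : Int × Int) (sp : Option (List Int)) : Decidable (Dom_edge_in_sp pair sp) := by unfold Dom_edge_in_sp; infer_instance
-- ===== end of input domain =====

-- B is occurrence-indexed: it collects the positions of the edge's first endpoint and
-- probes the neighbours, instead of A's materialized consecutive-pair list with two
-- membership scans (objective: alternative).

-- ===== PORT A =====
def edge_in_sp (pair : Int × Int) (sp : Option (List Int)) : Bool :=
  match sp with
  | none => false
  | some l =>
    if PySem.List.len l < 2 then false
    else
      -- pairs = [(sp[i], sp[i+1]) for i in range(len(sp)-1)]; every index is in range
      let pairs := (PySem.List.pyRange 0 (PySem.List.len l - 1) 1).map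
        (fun i => (PySem.List.pyGetD l i 0, PySem.List.pyGetD l (i + 1) 0))
      if pairs.contains pair then true
      else if pairs.contains (pair.2, pair.1) then true
      else false

-- ===== PORT B =====
def edge_in_sp_alt (pair : Int × Int) (sp : Option (List Int)) : Bool :=
  match sp with
  | none => false
  | some l =>
    if PySem.List.len l < 2 then false
    else
      let a := pair.1
      let b := pair.2
      -- hits = [i for i, v in enumerate(sp) if v == a]
      let hits := ((PySem.List.enumerate l).filter (fun p => p.2 == a)).map (·.1)
      let n := PySem.List.len l
      -- for i in hits: if (i+1 < n and sp[i+1] == b) or (i > 0 and sp[i-1] == b): return True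
      hits.any (fun i =>
        (decide (i + 1 < n) && (PySem.List.pyGetD l (i + 1) 0 == b)) ||
        (decide (0 < i) && (PySem.List.pyGetD l (i - 1) 0 == b)))

-- ===== PRECONDITION & SPEC =====
def Spec_edge_in_sp (pair : Int × Int) (sp : Option (List Int)) (out : Bool) : Prop := out = edge_in_sp_alt pair sp
instance (pair : Int × Int) (sp : Option (List Int)) (out : Bool) : Decidable (Spec_edge_in_sp pair sp out) := by unfold Spec_edge_in_sp; infer_instance

-- ===== CLAIM (what is proved, stated in full; the proofs are below) =====
def Claim_equal_edge_in_sp : Prop := ∀ (pair : Int × Int) (sp : Option (List Int)), Dom_edge_in_sp pair sp → Spec_edge_in_sp pair sp (edge_in_sp pair sp)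

-- ===== LEMMAS AND PROOFS =====

-- the common characterization: the edge (a, b) occurs, in either orientation,
-- as a consecutive pair of l
def EdgeOn (a b : Int) (l : List Int) : Prop :=
  ∃ k : Nat, ∃ h : k + 1 < l.length,
    (l[k] = a ∧ l[k + 1] = b) ∨ (l[k] = b ∧ l[k + 1] = a)

-- A's side: the pair list contains the edge or its reverse iff EdgeOn
theorem A_side (a b : Int) (l : List Int) (h2 : 2 ≤ l.length) :
    (((PySem.List.pyRange 0 (PySem.List.len l - 1) 1).map
        (fun i => (PySem.List.pyGetD l i 0, PySem.List.pyGetD l (i + 1) 0))).contains (a, b)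
     || ((PySem.List.pyRange 0 (PySem.List.len l - 1) 1).map
        (fun i => (PySem.List.pyGetD l i 0, PySem.List.pyGetD l (i + 1) 0))).contains (b, a))
    = true ↔ EdgeOn a b l := by
  have hcast : PySem.List.len l - 1 = ((l.length - 1 : Nat) : Int) := by
    simp [PySem.List.len_eq]; omega
  rw [hcast, PySem.List.pyRange_zero_natCast, Bool.or_eq_true]
  simp only [List.map_map, List.contains_eq_mem, decide_eq_true_eq, List.mem_map,
    List.mem_range, Function.comp, Prod.mk.injEq]
  have hget : ∀ (k : Nat) (hk : k < l.length),
      PySem.List.pyGetD l (k : Int) 0 = l[k]'hk := by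
    intro k hk
    rw [PySem.List.pyGetD_natCast]
    exact List.getD_eq_getElem l 0 hk
  constructor
  · rintro (⟨k, hk, hA, hB⟩ | ⟨k, hk, hB, hA⟩)
    · refine ⟨k, by omega, Or.inl ⟨?_, ?_⟩⟩
      · rw [← hA, hget k (by omega)]
      · rw [← hB]
        have : (k : Int) + 1 = ((k + 1 : Nat) : Int) := by push_cast; ring
        rw [this, hget (k + 1) (by omega)]
    · refine ⟨k, by omega, Or.inr ⟨?_, ?_⟩⟩
      · rw [← hB, hget k (by omega)]
      · rw [← hA]
        have : (k : Int) + 1 = ((k + 1 : Nat) : Int) := by push_cast; ring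
        rw [this, hget (k + 1) (by omega)]
  · rintro ⟨k, hk, hor⟩
    have hk1 : k < l.length - 1 := by omega
    have e1 : PySem.List.pyGetD l (k : Int) 0 = l[k]'(by omega) := hget k (by omega)
    have e2 : PySem.List.pyGetD l ((k : Int) + 1) 0 = l[k + 1]'hk := by
      have : (k : Int) + 1 = ((k + 1 : Nat) : Int) := by push_cast; ring
      rw [this]; exact hget (k + 1) hk
    rcases hor with ⟨ha, hb⟩ | ⟨hb, ha⟩
    · exact Or.inl ⟨k, hk1, by rw [e1, ha], by rw [e2, hb]⟩
    · exact Or.inr ⟨k, hk1, by rw [e1, hb], by rw [e2, ha]⟩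

-- B's side: some occurrence of a has b as a neighbour iff EdgeOn
theorem B_side (a b : Int) (l : List Int) :
    ((((PySem.List.enumerate l).filter (fun p => p.2 == a)).map (·.1)).any (fun i =>
        (decide (i + 1 < PySem.List.len l) && (PySem.List.pyGetD l (i + 1) 0 == b)) ||
        (decide (0 < i) && (PySem.List.pyGetD l (i - 1) 0 == b))))
    = true ↔ EdgeOn a b l := by
  simp only [List.any_eq_true, List.mem_map, List.mem_filter,
    Bool.or_eq_true, Bool.and_eq_true, decide_eq_true_eq, beq_iff_eq]
  constructor
  · rintro ⟨i, ⟨p, ⟨hp, hpa⟩, rfl⟩, hcase⟩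
    rcases (PySem.List.mem_enumerate_iff _ _ _).mp hp with ⟨k, hk, rfl⟩
    simp only [Int.zero_add] at hcase hpa ⊢
    rcases hcase with ⟨hlt, hget⟩ | ⟨hpos, hget⟩
    · have hk1 : k + 1 < l.length := by
        rw [PySem.List.len_eq] at hlt; exact_mod_cast (by omega : (k:Int) + 1 < l.length)
      refine ⟨k, hk1, Or.inl ⟨hpa, ?_⟩⟩
      have : (k : Int) + 1 = ((k + 1 : Nat) : Int) := by push_cast; ring
      rw [this, PySem.List.pyGetD_natCast] at hget
      rw [← hget]; exact (List.getD_eq_getElem l 0 hk1).symm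
    · have hk0 : 1 ≤ k := by exact_mod_cast hpos
      refine ⟨k - 1, by omega, Or.inr ⟨?_, ?_⟩⟩
      · have : (k : Int) - 1 = ((k - 1 : Nat) : Int) := by push_cast [hk0]; ring
        rw [this, PySem.List.pyGetD_natCast] at hget
        rw [← hget]; exact (List.getD_eq_getElem l 0 (by omega)).symm
      · simp only [Nat.sub_add_cancel hk0]; exact hpa
  · rintro ⟨k, hk, hor⟩
    rcases hor with ⟨ha, hb⟩ | ⟨hb, ha⟩
    · refine ⟨(k : Int), ⟨(k, l[k]'(by omega)), ⟨(PySem.List.mem_enumerate_iff _ _ _).mpr ⟨k, by omega, by simp⟩, by simpa using ha⟩, rfl⟩, Or.inl ⟨?_, ?_⟩⟩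
      · rw [PySem.List.len_eq]; omega
      · have : (k : Int) + 1 = ((k + 1 : Nat) : Int) := by push_cast; ring
        rw [this, PySem.List.pyGetD_natCast, List.getD_eq_getElem l 0 hk]; exact hb
    · refine ⟨((k + 1 : Nat) : Int), ⟨(k + 1, l[k + 1]'hk), ⟨(PySem.List.mem_enumerate_iff _ _ _).mpr ⟨k + 1, hk, by simp⟩, by simpa using ha⟩, rfl⟩, Or.inr ⟨?_, ?_⟩⟩
      · push_cast; omega
      · have : ((k + 1 : Nat) : Int) - 1 = ((k : Nat) : Int) := by push_cast; ring
        rw [this, PySem.List.pyGetD_natCast, List.getD_eq_getElem l 0 (by omega)]; exact hb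

theorem edge_in_sp_eq_alt (pair : Int × Int) (sp : Option (List Int)) :
    edge_in_sp pair sp = edge_in_sp_alt pair sp := by
  obtain ⟨a, b⟩ := pair
  cases sp with
  | none => rfl
  | some l =>
    simp only [edge_in_sp, edge_in_sp_alt]
    by_cases h : PySem.List.len l < 2
    · rw [if_pos h, if_pos h]
    · rw [if_neg h, if_neg h]
      have h2 : 2 ≤ l.length := by
        rw [PySem.List.len_eq] at h; exact_mod_cast not_lt.mp h
      have hB := B_side a b l
      have hA := A_side a b l h2
      apply Bool.eq_iff_iff.mpr
      rw [hB, ← hA, Bool.or_eq_true]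
      split_ifs with hc hd
      · exact iff_of_true rfl (Or.inl hc)
      · exact iff_of_true rfl (Or.inr hd)
      · exact iff_of_false (by simp) (fun hor => hor.elim hc hd)

-- ===== VERDICT (by name: the statement is the Claim_ definition above) =====
theorem edge_in_sp_spec : Claim_equal_edge_in_sp := by
  intro pair sp _
  unfold Spec_edge_in_sp
  exact edge_in_sp_eq_alt pair sp
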